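-- pv_equiv track=rewrite | github.com/labodj/lsh-core | tools/lsh_static_config/formatter.py | _schema_directive
-- ===== SOURCE A (Python) =====
-- def _schema_directive(existing: str) -> str | None:
--     """Preserve Taplo/VS Code schema hints across canonical formatting."""
--     for line in existing.splitlines():
--         stripped = line.strip()
--         if stripped.startswith("#:schema"):
--             return stripped
--         if stripped and not stripped.startswith("#"):
--             return None
--     return None
-- ===== SOURCE B (Python) =====
-- def _schema_directive(existing: str) -> str | None:
--     """Preserve Taplo/VS Code schema hints across canonical formatting."""
--     stripped = [line.strip() for line in existing.splitlines()]
--     # take the leading block of blank/comment lines (stop at first content line)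
--     block = []
--     for s in stripped:
--         if s and not s.startswith("#"):
--             break
--         block.append(s)
--     # search the block for the first schema directive
--     for s in block:
--         if s.startswith("#:schema"):
--             return s
--     return None
-- ===== Notes on version B (the rewrite author's own statement) =====
-- stated objective: alternative
-- what changed: B first strips all lines, takes the leading blank/comment block (takewhile-style), then searches that block for the first '#:schema' line, instead of A's single early-exit loop with combined return conditions.
import Mathlib
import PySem

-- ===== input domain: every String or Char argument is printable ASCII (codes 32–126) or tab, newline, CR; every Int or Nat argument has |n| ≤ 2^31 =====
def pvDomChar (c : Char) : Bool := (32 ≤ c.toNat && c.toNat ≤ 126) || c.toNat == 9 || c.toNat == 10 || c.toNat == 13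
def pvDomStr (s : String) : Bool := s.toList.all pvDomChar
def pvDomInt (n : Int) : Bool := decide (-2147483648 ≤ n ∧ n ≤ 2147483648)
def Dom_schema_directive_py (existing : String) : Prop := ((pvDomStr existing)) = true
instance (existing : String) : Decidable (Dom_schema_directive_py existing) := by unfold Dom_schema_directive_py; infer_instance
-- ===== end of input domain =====

-- B restructures A's single early-exit loop into two passes: take the leading blank/comment block, then search it for '#:schema' (objective: alternative decomposition).

-- ===== PORT A =====
-- the for-loop of A: strip each line, return it if it starts with '#:schema', stop with None at the first non-empty non-comment line
def schemaScanA : List String → Option String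
  | [] => none
  | line :: rest =>
    let stripped := PySem.Str.strip line
    if PySem.Str.startswith stripped "#:schema" then some stripped
    else if stripped != "" && !PySem.Str.startswith stripped "#" then none
    else schemaScanA rest

def schema_directive_py (existing : String) : Option String :=
  schemaScanA (PySem.Str.splitlines existing)

-- ===== PORT B =====
-- first loop of B: collect the leading block of blank/comment (already stripped) lines
def leadingBlock : List String → List String
  | [] => []
  | s :: rest =>
    if s != "" && !PySem.Str.startswith s "#" then []
    else s :: leadingBlock rest

-- second loop of B: first line of the block starting with '#:schema'
def findSchema : List String → Option String
  | [] => none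
  | s :: rest =>
    if PySem.Str.startswith s "#:schema" then some s else findSchema rest

def schema_directive_py_alt (existing : String) : Option String :=
  let stripped := (PySem.Str.splitlines existing).map PySem.Str.strip
  findSchema (leadingBlock stripped)

-- ===== PRECONDITION & SPEC =====
def Spec_schema_directive_py (existing : String) (out : Option String) : Prop := out = schema_directive_py_alt existing
instance (existing : String) (out : Option String) : Decidable (Spec_schema_directive_py existing out) := by unfold Spec_schema_directive_py; infer_instance

-- ===== CLAIM (what is proved, stated in full; the proofs are below) =====
def Claim_equal_schema_directive_py : Prop := ∀ (existing : String), Dom_schema_directive_py existing → Spec_schema_directive_py existing (schema_directive_py existing)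

-- ===== LEMMAS AND PROOFS =====

-- a line starting with '#:schema' starts with '#'
lemma startswith_schema_hash (l : List Char)
    (h : PySem.Chars.startswith l ['#', ':', 's', 'c', 'h', 'e', 'm', 'a'] = true) :
    PySem.Chars.startswith l ['#'] = true := by
  simp only [PySem.Chars.startswith_iff] at *
  exact List.IsPrefix.trans (by decide) h

lemma scan_eq (ls : List String) :
    schemaScanA ls = findSchema (leadingBlock (ls.map PySem.Str.strip)) := by
  induction ls with
  | nil => rfl
  | cons line rest ih =>
    simp only [List.map, schemaScanA, leadingBlock]
    split_ifs with h1 h2 h2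
    · obtain ⟨-, h2b⟩ : ¬PySem.Str.strip line = "" ∧
          PySem.Chars.startswith (PySem.Chars.strip line.toList) ['#'] = false := by simpa using h2
      exact absurd (startswith_schema_hash _ (by simpa using h1)) (by simp [h2b])
    · simp only [findSchema]
      rw [if_pos (by simpa using h1)]
    · rfl
    · simp only [findSchema]
      rw [if_neg (by simpa using h1)]
      exact ih

-- ===== VERDICT (by name: the statement is the Claim_ definition above) =====
theorem schema_directive_py_spec : Claim_equal_schema_directive_py := by
  intro existing _
  unfold Spec_schema_directive_py schema_directive_py schema_directive_py_alt
  exact scan_eq _
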